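-- pv_equiv track=rewrite | github.com/jbcodeforce/flink-estimator | src/flink_estimator/estimation.py | _greedy_pack_taskmanagers
-- ===== SOURCE A (Python) =====
-- def _greedy_pack_taskmanagers(
--     free_mem_per_node: list[int],
--     nb_taskmanagers: int,
--     tm_mem_mb: int,
-- ) -> tuple[list[int], int, bool, list[int]]:
--     """
--     Place nb_taskmanagers TMs, each using tm_mem_mb, on the worker with the most
--     remaining memory that can still fit a TM. Tie-break: lower node index.
--
--     Returns:
--         allocations: TMs per worker node (len == number of nodes)
--         max_on_a_node: max TMs on any single node after packing
--         success: True if all TMs were placed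
--     """
--     n = len(free_mem_per_node)
--     alloc: list[int] = [0] * n
--     remaining = list(free_mem_per_node)
--     for _ in range(nb_taskmanagers):
--         best_i = -1
--         best_rem = -1
--         for i in range(n):
--             r = remaining[i]
--             if r >= tm_mem_mb and r > best_rem:
--                 best_rem = r
--                 best_i = i
--         if best_i < 0:
--             return alloc, (max(alloc) if alloc else 0), False, remaining
--         remaining[best_i] -= tm_mem_mb
--         alloc[best_i] += 1
--     return alloc, max(alloc), True, remaining
-- ===== SOURCE B (Python) =====
-- def _insort(queue, item):
--     k = 0
--     while k < len(queue) and queue[k] < item: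
--         k += 1
--     queue.insert(k, item)
--
--
-- def _greedy_pack_taskmanagers(
--     free_mem_per_node: list[int],
--     nb_taskmanagers: int,
--     tm_mem_mb: int,
-- ) -> tuple[list[int], int, bool, list[int]]:
--     n = len(free_mem_per_node)
--     alloc: list[int] = [0] * n
--     remaining = list(free_mem_per_node)
--     # priority queue of (-remaining, index), kept in ascending order:
--     # the head is always the node with the most remaining memory (lowest index on ties)
--     queue = sorted((-r, i) for i, r in enumerate(remaining) if r >= tm_mem_mb)
--     for _ in range(nb_taskmanagers):
--         if not queue:
--             return alloc, (max(alloc) if alloc else 0), False, remaining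
--         negr, i = queue.pop(0)
--         r = -negr - tm_mem_mb
--         remaining[i] = r
--         alloc[i] += 1
--         if r >= tm_mem_mb:
--             _insort(queue, (-r, i))
--     return alloc, (max(alloc) if alloc else 0), True, remaining
-- ===== Notes on version B (the rewrite author's own statement) =====
-- stated objective: alternative
-- what changed: B replaces A's full O(n) argmax rescan per taskmanager by an ordered priority queue of (-remaining, index) pairs built once: each step pops the head (best node) and re-inserts the decremented entry at its ordered position, dropping entries that can no longer fit a TM.
-- outside the precondition, e.g. on _greedy_pack_taskmanagers([-1], 1, -2): A returns ([0], 0, False, [-1]), B returns ([1], 1, True, [1]); on _greedy_pack_taskmanagers([], 0, 100): A raises ValueError, B returns ([], 0, True, [])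
import Mathlib
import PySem

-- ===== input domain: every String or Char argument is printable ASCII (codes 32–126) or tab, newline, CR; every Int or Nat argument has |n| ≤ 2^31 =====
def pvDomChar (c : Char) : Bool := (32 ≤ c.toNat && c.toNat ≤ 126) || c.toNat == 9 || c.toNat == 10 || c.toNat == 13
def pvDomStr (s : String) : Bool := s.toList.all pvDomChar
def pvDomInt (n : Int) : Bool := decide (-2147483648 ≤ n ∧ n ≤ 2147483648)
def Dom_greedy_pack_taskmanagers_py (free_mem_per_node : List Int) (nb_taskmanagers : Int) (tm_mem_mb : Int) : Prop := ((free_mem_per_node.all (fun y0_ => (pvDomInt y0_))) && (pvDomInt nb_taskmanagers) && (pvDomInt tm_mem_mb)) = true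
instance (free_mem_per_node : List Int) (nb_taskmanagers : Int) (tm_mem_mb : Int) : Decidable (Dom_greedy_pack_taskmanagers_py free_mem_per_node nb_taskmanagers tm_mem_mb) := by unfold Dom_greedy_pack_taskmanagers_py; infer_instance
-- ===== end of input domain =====

-- B replaces A's per-TM full argmax rescan by an ordered priority queue of (-remaining, index)
-- pairs built once and maintained by ordered re-insertion (objective: alternative algorithm).

-- shared tiny helper: Python's max(l) totalised with default 0; the default is only
-- reachable outside Pre_ (A's `max(alloc)` raises ValueError exactly there)
def pyMaxD (l : List Int) : Int := (PySem.List.max? l (fun x => x)).getD 0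

-- ===== PORT A =====
-- inner `for i in range(n)` scan of A, one step of the fold
def pvSelStep (tm : Int) (best : Int × Int) (i r : Int) : Int × Int :=
  if tm ≤ r ∧ best.2 < r then (i, r) else best

-- the whole inner scan: best_i, best_rem starting from (-1, -1)
def pvSelectA (tm : Int) (remaining : List Int) : Int × Int :=
  (PySem.List.pyRange 0 (PySem.List.len remaining) 1).foldl
    (fun best i => pvSelStep tm best i (PySem.List.pyGetD remaining i 0)) (-1, -1)

-- `for _ in range(nb_taskmanagers)` with the early return on best_i < 0
def pvALoop (tm : Int) : Nat → List Int → List Int → List Int × Int × Bool × List Int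
  | 0, alloc, remaining => (alloc, pyMaxD alloc, true, remaining)
  | f+1, alloc, remaining =>
    let s := pvSelectA tm remaining
    if s.1 < 0 then (alloc, pyMaxD alloc, false, remaining)
    else pvALoop tm f (alloc.set s.1.toNat (alloc.getD s.1.toNat 0 + 1))
           (remaining.set s.1.toNat (remaining.getD s.1.toNat 0 - tm))

def greedy_pack_taskmanagers_py (free_mem_per_node : List Int) (nb_taskmanagers : Int) (tm_mem_mb : Int) : List Int × Int × Bool × List Int :=
  pvALoop tm_mem_mb nb_taskmanagers.toNat (List.replicate free_mem_per_node.length 0) free_mem_per_node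

-- ===== PORT B =====
-- Python tuple comparison `queue[k] < item` on (int, int) pairs: lexicographic
def pvKeyLt (x y : Int × Int) : Bool := x.1 < y.1 || (x.1 == y.1 && x.2 < y.2)

-- _insort: advance while queue[k] < item, insert there
def pvInsort (item : Int × Int) : List (Int × Int) → List (Int × Int)
  | [] => [item]
  | y :: t => if pvKeyLt y item then y :: pvInsort item t else item :: y :: t

-- the generator `((-r, i) for i, r in enumerate(remaining) if r >= tm_mem_mb)`
def pvFeasPairs (tm : Int) (remaining : List Int) : List (Int × Int) :=
  ((PySem.List.enumerate remaining 0).filter (fun p => decide (tm ≤ p.2))).map (fun p => (-p.2, p.1))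

-- B's packing loop: pop the queue head, decrement, re-insert if it still fits
def pvBLoop (tm : Int) : Nat → List Int → List Int → List (Int × Int) → List Int × Int × Bool × List Int
  | 0, alloc, remaining, _ => (alloc, pyMaxD alloc, true, remaining)
  | f+1, alloc, remaining, queue =>
    match queue with
    | [] => (alloc, pyMaxD alloc, false, remaining)
    | (negr, i) :: rest =>
      let r := -negr - tm
      pvBLoop tm f (alloc.set i.toNat (alloc.getD i.toNat 0 + 1)) (remaining.set i.toNat r)
        (if tm ≤ r then pvInsort (-r, i) rest else rest)

def greedy_pack_taskmanagers_py_alt (free_mem_per_node : List Int) (nb_taskmanagers : Int) (tm_mem_mb : Int) : List Int × Int × Bool × List Int :=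
  pvBLoop tm_mem_mb nb_taskmanagers.toNat (List.replicate free_mem_per_node.length 0) free_mem_per_node
    (PySem.List.sorted (pvFeasPairs tm_mem_mb free_mem_per_node) (fun p => toLex p) false)

-- ===== PRECONDITION & SPEC =====
-- Pre_ excludes (a) the inputs where A raises ValueError (empty node list with nb_taskmanagers ≤ 0:
-- max of an empty list), and (b) the defensible corner tm_mem_mb < 0, nb ≥ 1, every node's memory
-- negative but some node ≥ tm_mem_mb: there A's `-1` scan sentinel reports failure while B packs —
-- with a negative per-TM memory neither behaviour is specified.
def Pre_greedy_pack_taskmanagers_py (free_mem_per_node : List Int) (nb_taskmanagers : Int) (tm_mem_mb : Int) : Prop :=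
  ¬ (free_mem_per_node = [] ∧ nb_taskmanagers ≤ 0) ∧
  ¬ (tm_mem_mb < 0 ∧ 1 ≤ nb_taskmanagers ∧ (∀ x ∈ free_mem_per_node, x < 0) ∧ (∃ x ∈ free_mem_per_node, tm_mem_mb ≤ x))
instance (free_mem_per_node : List Int) (nb_taskmanagers : Int) (tm_mem_mb : Int) : Decidable (Pre_greedy_pack_taskmanagers_py free_mem_per_node nb_taskmanagers tm_mem_mb) := by unfold Pre_greedy_pack_taskmanagers_py; infer_instance

def pvWitness_greedy_pack_taskmanagers_py : List Int × Int × Int := ([4096, 8192, 2048], 3, 2048)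

def Spec_greedy_pack_taskmanagers_py (free_mem_per_node : List Int) (nb_taskmanagers : Int) (tm_mem_mb : Int) (out : List Int × Int × Bool × List Int) : Prop := out = greedy_pack_taskmanagers_py_alt free_mem_per_node nb_taskmanagers tm_mem_mb
instance (free_mem_per_node : List Int) (nb_taskmanagers : Int) (tm_mem_mb : Int) (out : List Int × Int × Bool × List Int) : Decidable (Spec_greedy_pack_taskmanagers_py free_mem_per_node nb_taskmanagers tm_mem_mb out) := by unfold Spec_greedy_pack_taskmanagers_py; infer_instance

-- ===== CLAIM (what is proved, stated in full; the proofs are below) =====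
def Claim_equal_greedy_pack_taskmanagers_py : Prop := ∀ (free_mem_per_node : List Int) (nb_taskmanagers : Int) (tm_mem_mb : Int), Dom_greedy_pack_taskmanagers_py free_mem_per_node nb_taskmanagers tm_mem_mb → Pre_greedy_pack_taskmanagers_py free_mem_per_node nb_taskmanagers tm_mem_mb → Spec_greedy_pack_taskmanagers_py free_mem_per_node nb_taskmanagers tm_mem_mb (greedy_pack_taskmanagers_py free_mem_per_node nb_taskmanagers tm_mem_mb)


-- ===== LEMMAS AND PROOFS =====

-- non-strict lexicographic order on the queue keys (proof-side)
def pvKeyLe (x y : Int × Int) : Prop := x.1 < y.1 ∨ (x.1 = y.1 ∧ x.2 ≤ y.2)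

lemma pvKeyLe_trans {x y z : Int × Int} (h1 : pvKeyLe x y) (h2 : pvKeyLe y z) : pvKeyLe x z := by
  unfold pvKeyLe at *; rcases h1 with h1 | ⟨e1, h1⟩ <;> rcases h2 with h2 | ⟨e2, h2⟩ <;> omega

lemma pvKeyLt_true {x y : Int × Int} (h : pvKeyLt x y = true) : pvKeyLe x y := by
  unfold pvKeyLt at h; unfold pvKeyLe; simp at h; omega

lemma pvKeyLt_false {x y : Int × Int} (h : pvKeyLt x y = false) : pvKeyLe y x := by
  unfold pvKeyLt at h; unfold pvKeyLe; simp at h; omega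

lemma pvInsort_perm (x : Int × Int) : ∀ l : List (Int × Int), (pvInsort x l).Perm (x :: l)
  | [] => by simp [pvInsort]
  | y :: t => by
    unfold pvInsort
    split
    · exact ((pvInsort_perm x t).cons y).trans (List.Perm.swap x y t)
    · exact List.Perm.refl _

lemma mem_pvInsort {x p : Int × Int} {l : List (Int × Int)} (h : p ∈ pvInsort x l) :
    p = x ∨ p ∈ l := by
  have := (pvInsort_perm x l).mem_iff.mp h
  simpa using this

lemma pvInsort_pairwise (x : Int × Int) : ∀ {l : List (Int × Int)},
    l.Pairwise pvKeyLe → (pvInsort x l).Pairwise pvKeyLe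
  | [], _ => by simp [pvInsort]
  | y :: t, hp => by
    rcases List.pairwise_cons.mp hp with ⟨hy, ht⟩
    unfold pvInsort
    split
    · rename_i hlt
      refine List.pairwise_cons.mpr ⟨?_, pvInsort_pairwise x ht⟩
      intro p hp'
      rcases mem_pvInsort hp' with rfl | hmem
      · exact pvKeyLt_true hlt
      · exact hy p hmem
    · rename_i hlt
      refine List.pairwise_cons.mpr ⟨?_, hp⟩
      intro p hp'
      rcases List.mem_cons.mp hp' with rfl | hmem
      · exact pvKeyLt_false (Bool.eq_false_iff.mpr hlt)
      · exact pvKeyLe_trans (pvKeyLt_false (Bool.eq_false_iff.mpr hlt)) (hy p hmem)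

-- feasible pairs with a general enumerate start (for the set-update induction)
def pvFeasAux (tm s : Int) (remaining : List Int) : List (Int × Int) :=
  ((PySem.List.enumerate remaining s).filter (fun p => decide (tm ≤ p.2))).map (fun p => (-p.2, p.1))

lemma pvFeasAux_cons (tm s x : Int) (t : List Int) :
    pvFeasAux tm s (x :: t) =
      (if tm ≤ x then [(-x, s)] else []) ++ pvFeasAux tm (s+1) t := by
  unfold pvFeasAux
  rw [PySem.List.enumerate_cons]
  by_cases h : tm ≤ x <;> simp [h]

lemma mem_pvFeasAux {tm s : Int} {rem : List Int} {p : Int × Int} :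
    p ∈ pvFeasAux tm s rem ↔ ∃ (k : Nat) (h : k < rem.length), tm ≤ rem[k] ∧ p = (-rem[k], s + k) := by
  unfold pvFeasAux
  simp only [List.mem_map, List.mem_filter, PySem.List.mem_enumerate_iff, decide_eq_true_eq]
  constructor
  · rintro ⟨q, ⟨⟨k, hk, rfl⟩, hle⟩, rfl⟩
    exact ⟨k, hk, hle, rfl⟩
  · rintro ⟨k, hk, hle, rfl⟩
    exact ⟨(s + k, rem[k]), ⟨⟨k, hk, rfl⟩, hle⟩, rfl⟩

lemma pvFeasAux_set (tm : Int) : ∀ (rem : List Int) (s : Int) (k : Nat) (v : Int)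
    (hk : k < rem.length), tm ≤ rem[k] →
    (pvFeasAux tm s (rem.set k v)).Perm
      ((if tm ≤ v then [(-v, s + k)] else []) ++ (pvFeasAux tm s rem).erase (-rem[k], s + k))
  | [], s, k, v, hk, _ => by simp at hk
  | x :: t, s, 0, v, hk, hf => by
    simp only [List.set_cons_zero, List.getElem_cons_zero] at hf ⊢
    rw [pvFeasAux_cons, pvFeasAux_cons, if_pos hf]
    simp only [Nat.cast_zero, add_zero, List.cons_append, List.nil_append, List.erase_cons_head]
    exact List.Perm.refl _
  | x :: t, s, k+1, v, hk, hf => by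
    simp only [List.set_cons_succ, List.getElem_cons_succ] at hf ⊢
    rw [pvFeasAux_cons, pvFeasAux_cons]
    have hk' : k < t.length := by simpa using hk
    have ih := pvFeasAux_set tm t (s+1) k v hk' hf
    have harith : (s + 1) + (k : Int) = s + ((k : Nat) + 1 : Nat) := by push_cast; ring
    have hne : ((-x, s) : Int × Int) ≠ (-t[k], s + ((k : Nat) + 1 : Nat)) := by
      intro h
      have := congrArg Prod.snd h
      simp only at this
      push_cast at this
      omega
    by_cases hx : tm ≤ x
    · rw [if_pos hx]
      have herase :
          (((-x, s) :: pvFeasAux tm (s+1) t).erase (-t[k], s + ((k : Nat) + 1 : Nat)))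
            = (-x, s) :: ((pvFeasAux tm (s+1) t).erase (-t[k], s + ((k : Nat) + 1 : Nat))) := by
        rw [List.erase_cons_tail]
        simp only [beq_iff_eq]
        exact hne
      simp only [List.cons_append, List.nil_append]
      rw [herase]
      rw [harith] at ih
      exact List.Perm.trans (ih.cons (-x, s)) List.perm_middle.symm
    · rw [if_neg hx]
      simp only [List.nil_append]
      rw [harith] at ih
      exact ih

-- ===== the A-side scan characterised =====

-- the fold step over (index, value) pairs
def pvScanStep (tm : Int) (best : Int × Int) (p : Int × Int) : Int × Int := pvSelStep tm best p.1 p.2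

lemma pvSelectA_eq_enum (tm : Int) (rem : List Int) :
    pvSelectA tm rem = (PySem.List.enumerate rem 0).foldl (pvScanStep tm) (-1, -1) := by
  unfold pvSelectA
  rw [PySem.List.enumerate_eq_map_pyRange (d := 0), List.foldl_map]
  simp [pvScanStep]

lemma pvScan_skip (tm : Int) : ∀ (l : List (Int × Int)) (acc : Int × Int),
    (∀ p ∈ l, tm ≤ p.2 → p.2 ≤ acc.2) → l.foldl (pvScanStep tm) acc = acc
  | [], acc, _ => rfl
  | p :: t, acc, h => by
    have hstep : pvScanStep tm acc p = acc := by
      unfold pvScanStep pvSelStep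
      rw [if_neg]
      rintro ⟨h1, h2⟩
      exact absurd (h p (List.mem_cons_self ..) h1) (by omega)
    rw [List.foldl_cons, hstep]
    exact pvScan_skip tm t acc (fun q hq => h q (List.mem_cons_of_mem p hq))

lemma pvScan_found (tm : Int) : ∀ (l₁ : List (Int × Int)) (i r : Int) (l₂ : List (Int × Int)) (acc : Int × Int),
    tm ≤ r → acc.2 < r →
    (∀ p ∈ l₁, tm ≤ p.2 → p.2 < r) →
    (∀ p ∈ l₂, tm ≤ p.2 → p.2 ≤ r) →
    (l₁ ++ (i, r) :: l₂).foldl (pvScanStep tm) acc = (i, r)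
  | [], i, r, l₂, acc, hr, hacc, _, h₂ => by
    simp only [List.nil_append, List.foldl_cons]
    have hstep : pvScanStep tm acc (i, r) = (i, r) := by
      unfold pvScanStep pvSelStep; rw [if_pos ⟨hr, hacc⟩]
    rw [hstep]
    exact pvScan_skip tm l₂ (i, r) h₂
  | q :: t, i, r, l₂, acc, hr, hacc, h₁, h₂ => by
    simp only [List.cons_append, List.foldl_cons]
    have hq := fun h => h₁ q (List.mem_cons_self ..) h
    have hnext : (pvScanStep tm acc q).2 < r := by
      unfold pvScanStep pvSelStep
      split
      · rename_i hcond; exact hq hcond.1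
      · exact hacc
    exact pvScan_found tm t i r l₂ _ hr hnext (fun p hp => h₁ p (List.mem_cons_of_mem q hp)) h₂

-- split of enumerate at a position
lemma pvEnum_split (rem : List Int) (k : Nat) (hk : k < rem.length) :
    PySem.List.enumerate rem 0 =
      PySem.List.enumerate (rem.take k) 0 ++ ((k : Int), rem[k]) :: PySem.List.enumerate (rem.drop (k+1)) ((k : Int) + 1) := by
  conv_lhs => rw [← List.take_append_drop k rem]
  rw [PySem.List.enumerate_append]
  have hdrop : rem.drop k = rem[k] :: rem.drop (k+1) := (List.drop_eq_getElem_cons hk)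
  rw [hdrop, PySem.List.enumerate_cons]
  have hlen : (rem.take k).length = k := List.length_take_of_le (le_of_lt hk)
  rw [hlen]
  norm_num

lemma pvSelectA_found (tm : Int) (rem : List Int) (k : Nat) (hk : k < rem.length)
    (hfeas : tm ≤ rem[k]) (hnn : 0 ≤ rem[k])
    (hlt : ∀ (j : Nat), j < rem.length → j < k → tm ≤ rem[j]! → rem[j]! < rem[k])
    (hle : ∀ (j : Nat), j < rem.length → k < j → tm ≤ rem[j]! → rem[j]! ≤ rem[k]) :
    pvSelectA tm rem = ((k : Int), rem[k]) := by
  rw [pvSelectA_eq_enum, pvEnum_split rem k hk]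
  have hacc : ((-1 : Int), (-1 : Int)).2 < rem[k] := by show (-1 : Int) < rem[k]; omega
  refine pvScan_found tm _ _ _ _ _ hfeas hacc ?_ ?_
  · intro p hp hple
    rcases (PySem.List.mem_enumerate_iff _ _ _).mp hp with ⟨j, hj, rfl⟩
    have hjk : j < k := by
      have := hj; simp only [List.length_take] at this; omega
    have hjlen : j < rem.length := by omega
    have he : (rem.take k)[j] = rem[j]! := by
      rw [List.getElem_take, getElem!_pos rem _ hjlen]
    simp only at hple ⊢
    rw [he] at hple ⊢
    exact hlt j hjlen hjk hple
  · intro p hp hple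
    rcases (PySem.List.mem_enumerate_iff _ _ _).mp hp with ⟨j, hj, rfl⟩
    have hjlen : k + 1 + j < rem.length := by
      have := hj; simp only [List.length_drop] at this; omega
    have he : (rem.drop (k+1))[j] = rem[k+1+j]! := by
      rw [List.getElem_drop, getElem!_pos rem _ hjlen]
    simp only at hple ⊢
    rw [he] at hple ⊢
    exact hle (k+1+j) hjlen (by omega) hple

lemma pvSelectA_none (tm : Int) (rem : List Int)
    (h : ∀ p ∈ PySem.List.enumerate rem 0, ¬ tm ≤ p.2) : pvSelectA tm rem = (-1, -1) := by
  rw [pvSelectA_eq_enum]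
  exact pvScan_skip tm _ _ (fun p hp hle => absurd hle (h p hp))

-- ===== the coupled loop invariant: A's rescan loop = B's queue loop =====

lemma pvQueue_head_nonneg (tm : Int) (rem : List Int) (negr i : Int) (rest : List (Int × Int))
    (hpw : ((negr, i) :: rest).Pairwise pvKeyLe)
    (hperm : ((negr, i) :: rest).Perm (pvFeasAux tm 0 rem))
    (hside : tm < 0 → ((negr, i) :: rest : List (Int × Int)) = [] ∨ ∃ x ∈ rem, 0 ≤ x) :
    0 ≤ -negr := by
  by_cases htm : 0 ≤ tm
  · -- tm ≥ 0: every feasible value is ≥ tm ≥ 0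
    have hmem : (negr, i) ∈ pvFeasAux tm 0 rem := hperm.mem_iff.mp (List.mem_cons_self ..)
    rcases mem_pvFeasAux.mp hmem with ⟨k, hk, hfk, heq⟩
    have h1 : negr = -rem[k] := (Prod.ext_iff.mp heq).1
    omega
  · rcases hside (by omega) with hnil | ⟨x, hx, hx0⟩
    · exact absurd hnil (by simp)
    · rcases List.getElem_of_mem hx with ⟨kx, hkx, rfl⟩
      have hmemx : ((-rem[kx], (kx : Int)) : Int × Int) ∈ pvFeasAux tm 0 rem := by
        rw [mem_pvFeasAux]
        exact ⟨kx, hkx, by omega, by simp⟩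
      have : ((-rem[kx], (kx : Int)) : Int × Int) ∈ (negr, i) :: rest := hperm.mem_iff.mpr hmemx
      rcases List.mem_cons.mp this with heq | hmem
    -- head is this entry, or the head precedes it in the order
      · have h1 : -rem[kx] = negr := (Prod.ext_iff.mp heq).1
        omega
      · have hle := (List.pairwise_cons.mp hpw).1 _ hmem
        unfold pvKeyLe at hle
        simp only at hle
        omega

lemma pvLoop_eq (tm : Int) : ∀ (fuel : Nat) (alloc rem : List Int) (q : List (Int × Int)),
    q.Pairwise pvKeyLe → q.Perm (pvFeasAux tm 0 rem) →
    (tm < 0 → q = [] ∨ ∃ x ∈ rem, 0 ≤ x) →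
    pvALoop tm fuel alloc rem = pvBLoop tm fuel alloc rem q
  | 0, alloc, rem, q, _, _, _ => rfl
  | f+1, alloc, rem, [], _, hperm, _ => by
    have hfeas : pvFeasAux tm 0 rem = [] := hperm.symm.eq_nil
    have hnone : pvSelectA tm rem = (-1, -1) := by
      refine pvSelectA_none tm rem ?_
      intro p hp hle
      have : ((-p.2, p.1) : Int × Int) ∈ pvFeasAux tm 0 rem := by
        unfold pvFeasAux
        exact List.mem_map.mpr ⟨p, List.mem_filter.mpr ⟨hp, by simpa using hle⟩, rfl⟩
      rw [hfeas] at this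
      exact absurd this (List.not_mem_nil)
    simp only [pvALoop, pvBLoop, hnone]
    norm_num
  | f+1, alloc, rem, (negr, i) :: rest, hpw, hperm, hside => by
    have hmem : (negr, i) ∈ pvFeasAux tm 0 rem := hperm.mem_iff.mp (List.mem_cons_self ..)
    rcases mem_pvFeasAux.mp hmem with ⟨k, hk, hfk, heq⟩
    have hnegr : negr = -rem[k] := (Prod.ext_iff.mp heq).1
    have hi : i = (k : Int) := by have := (Prod.ext_iff.mp heq).2; simpa using this
    have hr0 : 0 ≤ rem[k] := by
      have := pvQueue_head_nonneg tm rem negr i rest hpw hperm hside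
      omega
    have hhead := (List.pairwise_cons.mp hpw).1
    -- every other feasible node either holds strictly less memory or has a larger index
    have hkey : ∀ (j : Nat), j < rem.length → tm ≤ rem[j]! →
        rem[j]! < rem[k] ∨ (rem[j]! = rem[k] ∧ k ≤ j) := by
      intro j hj hfj
      have hememj : rem[j]! = rem[j] := getElem!_pos rem j hj
      rw [hememj] at hfj ⊢
      have hmemj : ((-rem[j], (j : Int)) : Int × Int) ∈ pvFeasAux tm 0 rem := by
        rw [mem_pvFeasAux]; exact ⟨j, hj, hfj, by simp⟩
      rcases List.mem_cons.mp (hperm.mem_iff.mpr hmemj) with heqj | hmemr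
      · have e1 : -rem[j] = negr := (Prod.ext_iff.mp heqj).1
        have e2 : (j : Int) = i := (Prod.ext_iff.mp heqj).2
        right; constructor <;> omega
      · have hle := hhead _ hmemr
        unfold pvKeyLe at hle
        simp only at hle
        omega
    have hsel : pvSelectA tm rem = ((k : Int), rem[k]) := by
      refine pvSelectA_found tm rem k hk hfk hr0 ?_ ?_
      · intro j hj hjk hfj
        rcases hkey j hj hfj with h | ⟨_, h⟩
        · exact h
        · omega
      · intro j hj hjk hfj
        rcases hkey j hj hfj with h | ⟨h, _⟩
        · omega
        · omega
    -- one step on each side, then the induction hypothesis on the updated state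
    have hrest_pw : rest.Pairwise pvKeyLe := (List.pairwise_cons.mp hpw).2
    have hrest_perm : rest.Perm ((pvFeasAux tm 0 rem).erase (-rem[k], (k : Int))) := by
      have h := hperm.erase ((-rem[k], (k : Int)) : Int × Int)
      rw [hnegr, hi] at *
      rwa [List.erase_cons_head] at h
    have hset := pvFeasAux_set tm rem 0 k (rem[k] - tm) hk hfk
    simp only [zero_add] at hset
    have hIH := pvLoop_eq tm f (alloc.set k (alloc.getD k 0 + 1)) (rem.set k (rem[k] - tm))
      (if tm ≤ rem[k] - tm then pvInsort (-(rem[k] - tm), (k : Int)) rest else rest)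
      (by split
          · exact pvInsort_pairwise _ hrest_pw
          · exact hrest_pw)
      (by refine List.Perm.trans ?_ hset.symm
          split
          · exact List.Perm.trans (pvInsort_perm _ rest) (hrest_perm.cons _)
          · simpa using hrest_perm)
      (by intro htm
          right
          refine ⟨rem[k] - tm, ?_, by omega⟩
          have hk' : k < (rem.set k (rem[k] - tm)).length := by simpa using hk
          have hv : (rem.set k (rem[k] - tm))[k] = rem[k] - tm := List.getElem_set_self hk'
          have hmemv := List.getElem_mem hk'
          rw [hv] at hmemv
          exact hmemv)
    simp only [pvALoop, pvBLoop, hsel, hnegr, hi]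
    rw [if_neg (by simp)]
    have htoNat : ((k : Int)).toNat = k := Int.toNat_natCast k
    have hgetD : rem.getD k 0 = rem[k] := List.getD_eq_getElem rem 0 hk
    simp only [htoNat, hgetD]
    have harg : - -rem[k] - tm = rem[k] - tm := by ring
    rw [harg]
    exact hIH

lemma pvFeas_nil_of_none (tm : Int) (free : List Int) (hnone : ¬ ∃ x ∈ free, tm ≤ x) :
    pvFeasAux tm 0 free = [] := by
  rw [List.eq_nil_iff_forall_not_mem]
  intro p hp
  rcases mem_pvFeasAux.mp hp with ⟨k, hk, hfk, _⟩
  exact hnone ⟨free[k], List.getElem_mem hk, hfk⟩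

-- ===== VERDICT (by name: the statement is the Claim_ definition above) =====
theorem greedy_pack_taskmanagers_py_spec : Claim_equal_greedy_pack_taskmanagers_py := by
  intro free nb tm _hdom hpre
  unfold Spec_greedy_pack_taskmanagers_py greedy_pack_taskmanagers_py greedy_pack_taskmanagers_py_alt
  by_cases hnb : nb ≤ 0
  · rw [Int.toNat_of_nonpos hnb]
    rfl
  · have hperm : (PySem.List.sorted (pvFeasPairs tm free) (fun p => toLex p) false).Perm
        (pvFeasAux tm 0 free) := PySem.List.sorted_perm ..
    have hpw : (PySem.List.sorted (pvFeasPairs tm free) (fun p => toLex p) false).Pairwise pvKeyLe := by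
      refine (PySem.List.sorted_pairwise ..).imp ?_
      intro a b hab
      have h := Prod.Lex.toLex_le_toLex.mp hab
      unfold pvKeyLe
      tauto
    have hside : tm < 0 →
        (PySem.List.sorted (pvFeasPairs tm free) (fun p => toLex p) false = [] ∨ ∃ x ∈ free, 0 ≤ x) := by
      intro htm
      by_cases hex : ∃ x ∈ free, 0 ≤ x
      · exact Or.inr hex
      · left
        push Not at hex
        have hnone : ¬ ∃ x ∈ free, tm ≤ x := by
          intro hsome
          exact hpre.2 ⟨htm, by omega, fun x hx => by have := hex x hx; omega, hsome⟩
        have hfeas := pvFeas_nil_of_none tm free hnone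
        have := hperm
        rw [hfeas] at this
        exact this.eq_nil
    exact pvLoop_eq tm nb.toNat _ free _ hpw hperm hside
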